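-- pv_equiv track=rewrite | github.com/Growail/Python-codes | kenken.py | operador4
-- ===== SOURCE A (Python) =====
-- def operador4(string):
--     resul=""
--     for i in string:
--         if i=="+":
--             resul="+"
--         elif i=="/":
--             resul="/"
--         elif i=="x":
--             resul="x"
--         elif i=="-":
--             resul="-"
--     return resul
-- ===== SOURCE B (Python) =====
-- def operador4(string):
--     for i in reversed(string):
--         if i in "+/x-":
--             return i
--     return ""
-- ===== Notes on version B (the rewrite author's own statement) =====
-- stated objective: simpler
-- what changed: Reverse scan with early return on the first operator character, replacing A's forward pass that overwrites an accumulator on every character.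
import Mathlib
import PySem

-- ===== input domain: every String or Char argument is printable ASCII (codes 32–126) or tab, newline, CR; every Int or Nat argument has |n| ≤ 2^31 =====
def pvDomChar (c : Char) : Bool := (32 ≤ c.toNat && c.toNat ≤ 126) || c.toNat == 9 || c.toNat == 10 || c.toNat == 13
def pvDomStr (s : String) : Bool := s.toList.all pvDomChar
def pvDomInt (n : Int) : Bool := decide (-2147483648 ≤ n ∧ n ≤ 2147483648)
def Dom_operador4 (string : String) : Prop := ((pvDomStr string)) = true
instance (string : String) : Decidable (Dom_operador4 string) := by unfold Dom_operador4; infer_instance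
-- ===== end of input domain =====

-- B scans the string from the end and returns the first operator it meets (early exit),
-- instead of A's forward pass that keeps overwriting an accumulator; objective: simpler.


-- ===== PORT A =====
-- one step of A's loop body: the if/elif chain, in the same branch order
def operador4_step (resul : String) (i : Char) : String :=
  if i = '+' then "+"
  else if i = '/' then "/"
  else if i = 'x' then "x"
  else if i = '-' then "-"
  else resul

def operador4 (string : String) : String :=
  string.toList.foldl operador4_step ""

-- ===== PORT B =====
-- B: walk the reversed character list, return the first operator met, "" if none
def operador4_alt_go : List Char → String
  | [] => ""
  | i :: rest => if i = '+' ∨ i = '/' ∨ i = 'x' ∨ i = '-' then String.singleton i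
                 else operador4_alt_go rest

def operador4_alt (string : String) : String :=
  operador4_alt_go string.toList.reverse

-- ===== PRECONDITION & SPEC =====
def Spec_operador4 (string : String) (out : String) : Prop := out = operador4_alt string
instance (string : String) (out : String) : Decidable (Spec_operador4 string out) := by unfold Spec_operador4; infer_instance

-- ===== CLAIM (what is proved, stated in full; the proofs are below) =====
def Claim_equal_operador4 : Prop := ∀ (string : String), Dom_operador4 string → Spec_operador4 string (operador4 string)

-- ===== LEMMAS AND PROOFS =====

-- scan with an explicit fallback accumulator, relating B's early-exit scan to A's fold
def goAcc (acc : String) : List Char → String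
  | [] => acc
  | i :: rest => if i = '+' ∨ i = '/' ∨ i = 'x' ∨ i = '-' then String.singleton i
                 else goAcc acc rest

theorem goAcc_append (acc : String) (r : List Char) (c : Char) :
    goAcc acc (r ++ [c]) = goAcc (operador4_step acc c) r := by
  induction r with
  | nil =>
      simp only [List.nil_append, goAcc, operador4_step]
      by_cases h1 : c = '+' <;> by_cases h2 : c = '/' <;> by_cases h3 : c = 'x'
        <;> by_cases h4 : c = '-' <;> simp_all [String.singleton]
  | cons d r ih =>
      simp only [List.cons_append, goAcc, ih]

theorem foldl_eq_goAcc (l : List Char) (acc : String) :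
    l.foldl operador4_step acc = goAcc acc l.reverse := by
  induction l generalizing acc with
  | nil => rfl
  | cons c l ih =>
      simp only [List.foldl_cons, List.reverse_cons, ih, goAcc_append]

theorem goAcc_empty (r : List Char) : goAcc "" r = operador4_alt_go r := by
  induction r with
  | nil => rfl
  | cons c r ih => simp only [goAcc, operador4_alt_go, ih]

-- ===== VERDICT (by name: the statement is the Claim_ definition above) =====
theorem operador4_spec : Claim_equal_operador4 := by
  intro s _
  unfold Spec_operador4 operador4 operador4_alt
  rw [foldl_eq_goAcc, goAcc_empty]
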